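-- pv_equiv track=rewrite | github.com/queelius/computational-explorations | src/oeis_attacks.py | initial_divisor_sums
-- ===== SOURCE A (Python) =====
-- import math
-- from typing import List, Tuple, Dict, Set, Optional
--
-- def divisors_sorted(m: int) -> List[int]:
--     """Return divisors of m sorted in increasing order."""
--     divs = []
--     for d in range(1, int(math.isqrt(m)) + 1):
--         if m % d == 0:
--             divs.append(d)
--             if d != m // d:
--                 divs.append(m // d)
--     return sorted(divs)
--
-- def initial_divisor_sums(m: int) -> List[int]:
--     """
--     Compute all partial sums of divisors of m (in increasing order).
--     Returns [d1, d1+d2, d1+d2+d3, ...].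
--     """
--     divs = divisors_sorted(m)
--     sums = []
--     running = 0
--     for d in divs:
--         running += d
--         sums.append(running)
--     return sums
-- ===== SOURCE B (Python) =====
-- import math
--
-- def initial_divisor_sums(m: int):
--     """Build the divisor list directly in increasing order (ascending small half,
--     then cofactors of the small half in reverse) -- no sort -- and fuse the
--     running prefix sums into the two scans."""
--     small = [d for d in range(1, math.isqrt(m) + 1) if m % d == 0]
--     sums = []
--     running = 0
--     for d in small:
--         running += d
--         sums.append(running)
--     for d in reversed(small):
--         if d * d != m:
--             running += m // d
--             sums.append(running)
--     return sums
-- ===== Notes on version B (the rewrite author's own statement) =====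
-- stated objective: alternative
-- what changed: B builds the divisor list directly in increasing order (ascending scan to isqrt(m) for the small half, then the cofactors of that half in reverse), eliminating A's collect-pairs-then-sorted() step, and fuses the prefix-sum accumulation into the two scans instead of a separate third loop.
import Mathlib
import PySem

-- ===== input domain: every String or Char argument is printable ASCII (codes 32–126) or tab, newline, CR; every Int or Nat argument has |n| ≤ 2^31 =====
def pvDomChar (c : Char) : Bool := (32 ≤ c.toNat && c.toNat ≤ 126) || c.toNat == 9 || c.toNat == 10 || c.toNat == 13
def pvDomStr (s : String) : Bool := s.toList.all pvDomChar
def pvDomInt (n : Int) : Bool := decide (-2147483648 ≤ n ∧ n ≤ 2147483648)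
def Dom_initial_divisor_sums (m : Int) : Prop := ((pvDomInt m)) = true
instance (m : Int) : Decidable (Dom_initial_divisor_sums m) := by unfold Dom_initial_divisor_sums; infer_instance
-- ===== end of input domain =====

-- B builds the divisor list directly in increasing order (ascending small half up to
-- isqrt(m), then the cofactors of that half in reverse) instead of A's collect-then-sorted(),
-- and fuses the prefix sums into the two scans; no separate list, no sort.

-- ===== PORT A =====
-- divisors_sorted: collect d and m//d for d up to isqrt(m), then sorted()
def divisors_sorted (m : Int) : List Int :=
  PySem.List.sorted
    ((PySem.List.pyRange 1 (((Nat.sqrt m.toNat : Nat) : Int) + 1) 1).foldl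
      (fun acc d =>
        if PySem.Int.mod m d = 0 then
          acc ++ [d] ++ (if d ≠ PySem.Int.floordiv m d then [PySem.Int.floordiv m d] else [])
        else acc) [])
    (fun x => x) false

def initial_divisor_sums (m : Int) : List Int :=
  ((divisors_sorted m).foldl
    (fun (st : List Int × Int) d => (st.1 ++ [st.2 + d], st.2 + d)) ([], 0)).1

-- ===== PORT B =====
-- small = [d for d in range(1, isqrt(m)+1) if m % d == 0]
def pvSmall (m : Int) : List Int :=
  (PySem.List.pyRange 1 (((Nat.sqrt m.toNat : Nat) : Int) + 1) 1).filter
    (fun d => PySem.Int.mod m d = 0)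

def initial_divisor_sums_alt (m : Int) : List Int :=
  ((pvSmall m).reverse.foldl
    (fun (st : List Int × Int) d =>
      if d * d ≠ m then (st.1 ++ [st.2 + PySem.Int.floordiv m d], st.2 + PySem.Int.floordiv m d)
      else st)
    ((pvSmall m).foldl
      (fun (st : List Int × Int) d => (st.1 ++ [st.2 + d], st.2 + d)) ([], 0))).1

-- ===== PRECONDITION & SPEC =====
-- Pre_ excludes negative m, exactly where math.isqrt raises ValueError (in A and in B alike).
def Pre_initial_divisor_sums (m : Int) : Prop := 0 ≤ m
instance (m : Int) : Decidable (Pre_initial_divisor_sums m) := by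
  unfold Pre_initial_divisor_sums; infer_instance
def pvWitness_initial_divisor_sums : Int := (12)

def Spec_initial_divisor_sums (m : Int) (out : List Int) : Prop := out = initial_divisor_sums_alt m
instance (m : Int) (out : List Int) : Decidable (Spec_initial_divisor_sums m out) := by unfold Spec_initial_divisor_sums; infer_instance

-- ===== CLAIM (what is proved, stated in full; the proofs are below) =====
def Claim_equal_initial_divisor_sums : Prop := ∀ (m : Int), Dom_initial_divisor_sums m → Pre_initial_divisor_sums m → Spec_initial_divisor_sums m (initial_divisor_sums m)

-- ===== LEMMAS AND PROOFS =====

-- the pieces A appends for one d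
def pvPiece (m d : Int) : List Int :=
  if PySem.Int.mod m d = 0 then
    d :: (if d ≠ PySem.Int.floordiv m d then [PySem.Int.floordiv m d] else [])
  else []

lemma pvFold_eq_flatMap (m : Int) (l : List Int) (acc : List Int) :
    l.foldl (fun acc d =>
        if PySem.Int.mod m d = 0 then
          acc ++ [d] ++ (if d ≠ PySem.Int.floordiv m d then [PySem.Int.floordiv m d] else [])
        else acc) acc = acc ++ l.flatMap (pvPiece m) := by
  induction l generalizing acc with
  | nil => simp
  | cons x xs ih =>
    simp only [List.foldl_cons, List.flatMap_cons, ih, pvPiece]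
    split_ifs with h1 h2 <;> simp

-- arithmetic facts about divisors, for 0 < m
lemma pv_ediv_pos {m x : Int} (hm : 0 < m) (hx : 0 < x) (hdvd : x ∣ m) : 0 < m / x := by
  rcases hdvd with ⟨c, rfl⟩
  rw [Int.mul_ediv_cancel_left _ (by omega)]
  nlinarith

lemma pv_mul_ediv {m x : Int} (hx : x ≠ 0) (hdvd : x ∣ m) : x * (m / x) = m :=
  Int.mul_ediv_cancel' hdvd

lemma pv_ediv_ediv {m x : Int} (hm : 0 < m) (hx : 0 < x) (hdvd : x ∣ m) :
    m / (m / x) = x := by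
  have h := pv_mul_ediv (by omega) hdvd
  have h2 : 0 < m / x := pv_ediv_pos hm hx hdvd
  calc m / (m / x) = (m / x) * x / (m / x) := by rw [mul_comm x (m/x)] at h; rw [h]
    _ = x := Int.mul_ediv_cancel_left x (by omega)

lemma pv_ediv_dvd {m x : Int} (hdvd : x ∣ m) : (m / x) ∣ m :=
  Int.ediv_dvd_of_dvd hdvd

-- the isqrt bracket: for 0 ≤ m, with s = sqrt(toNat m), s*s ≤ m < (s+1)*(s+1)
lemma pv_sqrt_le {m : Int} (hm : 0 ≤ m) :
    ((Nat.sqrt m.toNat : Nat) : Int) * ((Nat.sqrt m.toNat : Nat) : Int) ≤ m := by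
  conv_rhs => rw [← Int.toNat_of_nonneg hm]
  have h := Nat.sqrt_le' m.toNat
  rw [pow_two] at h
  exact_mod_cast h

lemma pv_lt_sqrt_succ {m : Int} (hm : 0 ≤ m) :
    m < (((Nat.sqrt m.toNat : Nat) : Int) + 1) * (((Nat.sqrt m.toNat : Nat) : Int) + 1) := by
  conv_lhs => rw [← Int.toNat_of_nonneg hm]
  have h := Nat.lt_succ_sqrt' m.toNat
  rw [pow_two] at h
  have h2 : ((m.toNat : Nat) : Int) < (((Nat.sqrt m.toNat).succ * (Nat.sqrt m.toNat).succ : Nat) : Int) := by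
    exact_mod_cast h
  push_cast at h2
  linarith

-- a divisor d ≤ s with d ≠ m/d has cofactor m/d > s
lemma pv_cofactor_gt {m d s : Int} (hm : 0 < m) (hses : s * s ≤ m) (hlt : m < (s+1)*(s+1))
    (hd1 : 1 ≤ d) (hds : d ≤ s) (hdvd : d ∣ m) (hne : d ≠ m / d) : s < m / d := by
  by_contra hle
  push_neg at hle
  have hmul := pv_mul_ediv (show d ≠ 0 by omega) hdvd
  have hq : 0 < m / d := pv_ediv_pos hm (by omega) hdvd
  have hs0 : 0 < s := by nlinarith
  rcases lt_or_eq_of_le hds with hdlt | rfl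
  · -- d < s: m = d * (m/d) ≤ d * s < s * s ≤ m, absurd
    have h1 : d * (m / d) ≤ d * s := mul_le_mul_of_nonneg_left hle (by omega)
    have h2 : d * s < s * s := mul_lt_mul_of_pos_right hdlt hs0
    omega
  · -- d = s: s * (m/s) = s * s forces m/s = s = d, contradicting hne
    have h3 : d * (m / d) ≤ d * d := mul_le_mul_of_nonneg_left hle (by omega)
    have h4 : d * d ≤ m := hses
    have h5 : d * (m / d) = d * d := by omega
    have h6 : m / d = d := by
      have := mul_left_cancel₀ (show d ≠ 0 by omega) h5
      omega
    exact hne (by omega)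

-- membership characterisation of A's raw list
lemma pv_mem_piece {m d x : Int} (hm : 0 < m) (hd1 : 1 ≤ d) :
    x ∈ pvPiece m d ↔ d ∣ m ∧ (x = d ∨ (d ≠ m / d ∧ x = m / d)) := by
  have hfd : PySem.Int.floordiv m d = m / d :=
    PySem.Int.floordiv_eq_ediv_of_pos (show (0:Int) < d by omega)
  unfold pvPiece
  by_cases h1 : d ∣ m
  · have hm0 : PySem.Int.mod m d = 0 := (PySem.Int.mod_eq_zero_iff_dvd m d).mpr h1
    rw [if_pos hm0]
    by_cases h2 : d = m / d
    · rw [if_neg (show ¬ (d ≠ PySem.Int.floordiv m d) by rw [hfd]; exact not_not_intro h2)]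
      simp only [List.mem_singleton, h1, true_and]
      constructor
      · exact Or.inl
      · rintro (h | ⟨hne, h⟩)
        · exact h
        · exact absurd h2 hne
    · rw [if_pos (show d ≠ PySem.Int.floordiv m d by rw [hfd]; exact h2)]
      simp only [hfd, List.mem_cons, List.mem_singleton, List.not_mem_nil, or_false,
        h1, true_and]
      tauto
  · have hm0 : ¬ PySem.Int.mod m d = 0 := fun h => h1 ((PySem.Int.mod_eq_zero_iff_dvd m d).mp h)
    rw [if_neg hm0]
    simp [h1]

def pvS (m : Int) : Int := ((Nat.sqrt m.toNat : Nat) : Int)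

lemma pv_mem_flat {m x : Int} (hm : 0 < m) :
    x ∈ (PySem.List.pyRange 1 (pvS m + 1) 1).flatMap (pvPiece m) ↔ (1 ≤ x ∧ x ≤ m ∧ x ∣ m) := by
  have hsle := pv_sqrt_le (le_of_lt hm)
  have hslt := pv_lt_sqrt_succ (le_of_lt hm)
  rw [show ((Nat.sqrt m.toNat : Nat) : Int) = pvS m from rfl] at hsle hslt
  have hs0 : 0 ≤ pvS m := Int.natCast_nonneg _
  constructor
  · intro hx
    rw [List.mem_flatMap] at hx
    obtain ⟨d, hd, hpd⟩ := hx
    rw [PySem.List.mem_pyRange_one] at hd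
    obtain ⟨hd1, hd2⟩ := hd
    have hd2 : d ≤ pvS m := by omega
    rw [pv_mem_piece hm hd1] at hpd
    obtain ⟨hdvd, hcase⟩ := hpd
    rcases hcase with rfl | ⟨hne, rfl⟩
    · refine ⟨hd1, ?_, hdvd⟩
      exact Int.le_of_dvd hm hdvd
    · have hq : 0 < m / d := pv_ediv_pos hm (by omega) hdvd
      have hqd : (m / d) ∣ m := pv_ediv_dvd hdvd
      exact ⟨by omega, Int.le_of_dvd hm hqd, hqd⟩
  · rintro ⟨hx1, hxm, hdvd⟩
    rw [List.mem_flatMap]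
    by_cases hxs : x ≤ pvS m
    · refine ⟨x, ?_, ?_⟩
      · rw [PySem.List.mem_pyRange_one]; omega
      · rw [pv_mem_piece hm hx1]; exact ⟨hdvd, Or.inl rfl⟩
    · push_neg at hxs
      refine ⟨m / x, ?_, ?_⟩
      · rw [PySem.List.mem_pyRange_one]
        have hq : 0 < m / x := pv_ediv_pos hm (by omega) hdvd
        have hqs : m / x ≤ pvS m := by
          by_contra hgt
          push_neg at hgt
          have hmul := pv_mul_ediv (show x ≠ 0 by omega) hdvd
          nlinarith [hmul]
        omega
      · have hq : 0 < m / x := pv_ediv_pos hm (by omega) hdvd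
        have hq1 : 1 ≤ m / x := hq
        rw [pv_mem_piece hm hq1]
        have hxx : m / (m / x) = x := pv_ediv_ediv hm (by omega) hdvd
        have hqs : m / x ≤ pvS m := by
          by_contra hgt
          push_neg at hgt
          have hmul := pv_mul_ediv (show x ≠ 0 by omega) hdvd
          nlinarith [hmul]
        refine ⟨pv_ediv_dvd hdvd, Or.inr ⟨?_, hxx.symm⟩⟩
        rw [hxx]; omega

lemma pv_nodup_flat {m : Int} (hm : 0 < m) :
    ((PySem.List.pyRange 1 (pvS m + 1) 1).flatMap (pvPiece m)).Nodup := by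
  have hsle := pv_sqrt_le (le_of_lt hm)
  have hslt := pv_lt_sqrt_succ (le_of_lt hm)
  rw [show ((Nat.sqrt m.toNat : Nat) : Int) = pvS m from rfl] at hsle hslt
  rw [List.nodup_flatMap]
  constructor
  · intro d hd
    rw [PySem.List.mem_pyRange_one] at hd
    unfold pvPiece
    split_ifs with h1 h2
    · simp [h2]
    · simp
    · simp
  · -- pairwise disjoint pieces
    have hpw := PySem.List.pairwise_lt_pyRange_one (a := 1) (b := pvS m + 1)
    refine hpw.imp_of_mem ?_
    intro d e hd he hlt
    rw [PySem.List.mem_pyRange_one] at hd he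
    intro x hxd hxe
    have hfacts : ∀ {a : Int}, 1 ≤ a → a ≤ pvS m → x ∈ pvPiece m a →
        a ∣ m ∧ (x = a ∨ (a ≠ m / a ∧ x = m / a ∧ pvS m < m / a)) := by
      intro a ha1 has hx
      rw [pv_mem_piece hm ha1] at hx
      obtain ⟨hdvd, hc⟩ := hx
      refine ⟨hdvd, ?_⟩
      rcases hc with rfl | ⟨hne, rfl⟩
      · exact Or.inl rfl
      · exact Or.inr ⟨hne, rfl, pv_cofactor_gt hm hsle hslt ha1 has hdvd hne⟩
    obtain ⟨hdvd, hcd⟩ := hfacts (by omega) (by omega) hxd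
    obtain ⟨hedvd, hce⟩ := hfacts (by omega) (by omega) hxe
    rcases hcd with rfl | ⟨hned, rfl, hgtd⟩ <;> rcases hce with h | ⟨hnee, h, hgte⟩
    · omega
    · omega
    · omega
    · -- m/d = m/e with d < e: contradiction via m/(m/d) = d
      have h1 : m / (m / d) = d := pv_ediv_ediv hm (by omega) hdvd
      have h2 : m / (m / e) = e := pv_ediv_ediv hm (by omega) hedvd
      rw [h] at h1
      omega

-- strict monotonicity of cofactors: bigger divisor, smaller cofactor
lemma pv_div_lt_div {m a b : Int} (hm : 0 < m) (hb : 1 ≤ b) (hba : b < a)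
    (ha : a ∣ m) (hbd : b ∣ m) : m / a < m / b := by
  have hqa : 0 < m / a := pv_ediv_pos hm (by omega) ha
  have hqb : 0 < m / b := pv_ediv_pos hm (by omega) hbd
  have hma := pv_mul_ediv (show a ≠ 0 by omega) ha
  have hmb := pv_mul_ediv (show b ≠ 0 by omega) hbd
  by_contra hle
  push_neg at hle
  have h1 : b * (m / b) ≤ b * (m / a) := mul_le_mul_of_nonneg_left hle (by omega)
  have h2 : b * (m / a) < a * (m / a) := mul_lt_mul_of_pos_right hba hqa
  omega

lemma pv_mem_small {m x : Int} : x ∈ pvSmall m ↔ (1 ≤ x ∧ x ≤ pvS m ∧ x ∣ m) := by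
  unfold pvSmall
  rw [List.mem_filter, PySem.List.mem_pyRange_one,
      show ((Nat.sqrt m.toNat : Nat) : Int) = pvS m from rfl]
  simp only [decide_eq_true_eq, PySem.Int.mod_eq_zero_iff_dvd]
  omega

-- d*d ≠ m is exactly d ≠ m/d for a positive divisor d
lemma pv_sq_ne_iff {m d : Int} (hm : 0 < m) (hd : 1 ≤ d) (hdvd : d ∣ m) :
    d * d ≠ m ↔ d ≠ m / d := by
  have hmul := pv_mul_ediv (show d ≠ 0 by omega) hdvd
  constructor
  · intro h hq
    refine h ?_
    nth_rewrite 2 [hq]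
    exact hmul
  · intro h hq
    have h5 : d * (m / d) = d * d := by rw [hq]; exact hmul
    have h6 : m / d = d := mul_left_cancel₀ (show d ≠ 0 by omega) h5
    exact h h6.symm

-- B's divisor list: the ascending small half followed by its cofactors in reverse
def pvLarge (m : Int) : List Int :=
  ((pvSmall m).reverse.filter (fun d => d * d ≠ m)).map (fun d => PySem.Int.floordiv m d)

lemma pv_mem_large {m x : Int} (hm : 0 < m) :
    x ∈ pvLarge m ↔ ∃ d, d ∈ pvSmall m ∧ d * d ≠ m ∧ x = m / d := by
  unfold pvLarge
  rw [List.mem_map]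
  constructor
  · rintro ⟨d, hd, rfl⟩
    rw [List.mem_filter, List.mem_reverse] at hd
    obtain ⟨hds, hdq⟩ := hd
    have hd1 : 1 ≤ d := (pv_mem_small.mp hds).1
    refine ⟨d, hds, by simpa using hdq, ?_⟩
    rw [PySem.Int.floordiv_eq_ediv_of_pos (show (0:Int) < d by omega)]
  · rintro ⟨d, hds, hdq, rfl⟩
    have hd1 : 1 ≤ d := (pv_mem_small.mp hds).1
    refine ⟨d, ?_, ?_⟩
    · rw [List.mem_filter, List.mem_reverse]; exact ⟨hds, by simpa using hdq⟩
    · rw [PySem.Int.floordiv_eq_ediv_of_pos (show (0:Int) < d by omega)]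

lemma pv_pairwise_small (m : Int) : (pvSmall m).Pairwise (· < ·) :=
  List.Pairwise.filter _
    (PySem.List.pairwise_lt_pyRange_one 1 (((Nat.sqrt m.toNat : Nat) : Int) + 1))

lemma pv_large_gt {m x : Int} (hm : 0 < m) (hx : x ∈ pvLarge m) : pvS m < x := by
  have hsle := pv_sqrt_le (le_of_lt hm)
  have hslt := pv_lt_sqrt_succ (le_of_lt hm)
  rw [show ((Nat.sqrt m.toNat : Nat) : Int) = pvS m from rfl] at hsle hslt
  rw [pv_mem_large hm] at hx
  obtain ⟨d, hds, hdq, rfl⟩ := hx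
  obtain ⟨hd1, hdr, hdvd⟩ := pv_mem_small.mp hds
  exact pv_cofactor_gt hm hsle hslt hd1 hdr hdvd ((pv_sq_ne_iff hm hd1 hdvd).mp hdq)

lemma pv_pairwise_B {m : Int} (hm : 0 < m) :
    ((pvSmall m) ++ (pvLarge m)).Pairwise (· < ·) := by
  rw [List.pairwise_append]
  refine ⟨pv_pairwise_small m, ?_, ?_⟩
  · unfold pvLarge
    rw [List.pairwise_map]
    have h1 : ((pvSmall m).reverse.filter (fun d => d * d ≠ m)).Pairwise (· > ·) :=
      List.Pairwise.filter _ (List.pairwise_reverse.mpr (pv_pairwise_small m))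
    refine h1.imp_of_mem ?_
    intro a b ha hb hab
    rw [List.mem_filter, List.mem_reverse] at ha hb
    have ha1 := pv_mem_small.mp ha.1
    have hb1 := pv_mem_small.mp hb.1
    have h2 : m / a < m / b := pv_div_lt_div hm hb1.1 hab ha1.2.2 hb1.2.2
    rw [PySem.Int.floordiv_eq_ediv_of_pos (show (0:Int) < a by omega),
        PySem.Int.floordiv_eq_ediv_of_pos (show (0:Int) < b by omega)]
    exact h2
  · intro a ha b hb
    have h1 := (pv_mem_small.mp ha).2.1
    have h2 := pv_large_gt hm hb
    omega

lemma pv_mem_B {m x : Int} (hm : 0 < m) :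
    x ∈ (pvSmall m) ++ (pvLarge m) ↔ (1 ≤ x ∧ x ≤ m ∧ x ∣ m) := by
  have hsle := pv_sqrt_le (le_of_lt hm)
  have hslt := pv_lt_sqrt_succ (le_of_lt hm)
  rw [show ((Nat.sqrt m.toNat : Nat) : Int) = pvS m from rfl] at hsle hslt
  rw [List.mem_append, pv_mem_small, pv_mem_large hm]
  constructor
  · rintro (⟨hx1, hxr, hdvd⟩ | ⟨d, hds, hdq, rfl⟩)
    · exact ⟨hx1, Int.le_of_dvd hm hdvd, hdvd⟩
    · obtain ⟨hd1, hdr, hdvd⟩ := pv_mem_small.mp hds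
      have hq : 0 < m / d := pv_ediv_pos hm (by omega) hdvd
      have hqd : (m / d) ∣ m := pv_ediv_dvd hdvd
      exact ⟨by omega, Int.le_of_dvd hm hqd, hqd⟩
  · rintro ⟨hx1, hxm, hdvd⟩
    by_cases hxs : x ≤ pvS m
    · exact Or.inl ⟨hx1, hxs, hdvd⟩
    · push_neg at hxs
      have hq : 0 < m / x := pv_ediv_pos hm (by omega) hdvd
      have hmul := pv_mul_ediv (show x ≠ 0 by omega) hdvd
      have hqs : m / x ≤ pvS m := by
        by_contra hgt
        push_neg at hgt
        nlinarith [hmul]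
      have hxx : m / (m / x) = x := pv_ediv_ediv hm (by omega) hdvd
      have hqdvd : (m / x) ∣ m := pv_ediv_dvd hdvd
      refine Or.inr ⟨m / x, pv_mem_small.mpr ⟨hq, hqs, hqdvd⟩, ?_, hxx.symm⟩
      rw [pv_sq_ne_iff hm hq hqdvd, hxx]
      omega

-- the second fold of B is the prefix-sum fold over pvLarge
lemma pv_foldB_large (m : Int) (l : List Int) (st : List Int × Int) :
    l.foldl
      (fun (st : List Int × Int) d =>
        if d * d ≠ m then (st.1 ++ [st.2 + PySem.Int.floordiv m d], st.2 + PySem.Int.floordiv m d)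
        else st) st
    = ((l.filter (fun d => d * d ≠ m)).map (fun d => PySem.Int.floordiv m d)).foldl
        (fun (st : List Int × Int) d => (st.1 ++ [st.2 + d], st.2 + d)) st := by
  induction l generalizing st with
  | nil => rfl
  | cons x xs ih =>
    by_cases h : x * x ≠ m
    · simp only [List.foldl_cons, List.filter_cons, decide_eq_true h, if_true,
        List.map_cons, if_pos h]
      exact ih _
    · simp only [List.foldl_cons, List.filter_cons, decide_eq_false h, if_false,
        if_neg h]
      exact ih _

-- the two divisor lists coincide for 0 < m
lemma pv_divs_eq {m : Int} (hm : 0 < m) :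
    divisors_sorted m = (pvSmall m) ++ (pvLarge m) := by
  unfold divisors_sorted
  rw [pvFold_eq_flatMap, List.nil_append,
      show ((Nat.sqrt m.toNat : Nat) : Int) = pvS m from rfl]
  apply PySem.List.sorted_eq_of_perm_of_pairwise_lt
  · rw [List.perm_ext_iff_of_nodup
      (((pv_pairwise_B hm).imp ne_of_lt)) (pv_nodup_flat hm)]
    intro x
    rw [pv_mem_B hm, pv_mem_flat hm]
  · exact pv_pairwise_B hm

-- ===== VERDICT (by name: the statement is the Claim_ definition above) =====
theorem initial_divisor_sums_spec : Claim_equal_initial_divisor_sums := by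
  intro m hdom hpre
  unfold Spec_initial_divisor_sums initial_divisor_sums initial_divisor_sums_alt
  have hpre' : (0:Int) ≤ m := hpre
  rcases lt_or_eq_of_le hpre' with hm | hm
  · rw [pv_foldB_large]
    rw [show ((pvSmall m).reverse.filter (fun d => d * d ≠ m)).map
          (fun d => PySem.Int.floordiv m d) = pvLarge m from rfl]
    rw [pv_divs_eq hm, List.foldl_append]
  · subst hm; rfl
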